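-- pv_equiv track=rewrite | github.com/hannsadrian/adventofcode23 | day2/two.py | get_set_power
-- ===== SOURCE A (Python) =====
-- def get_set_power(draws):
-- 	required_red   = 0
-- 	required_green = 0
-- 	required_blue  = 0
--
-- 	for draw in draws:
-- 		for balls in draw:
-- 			if balls[0] == "red" and required_red < balls[1]:
-- 				required_red = balls[1]
-- 			elif balls[0] == "green" and required_green < balls[1]:
-- 				required_green = balls[1]
-- 			elif balls[0] == "blue" and required_blue < balls[1]:
-- 				required_blue = balls[1]
--
-- 	return required_red * required_green * required_blue
-- ===== SOURCE B (Python) =====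
-- def get_set_power(draws):
--     flat = [balls for draw in draws for balls in draw]
--     red = max([0] + [c for col, c in flat if col == "red"])
--     green = max([0] + [c for col, c in flat if col == "green"])
--     blue = max([0] + [c for col, c in flat if col == "blue"])
--     return red * green * blue
-- ===== Notes on version B (the rewrite author's own statement) =====
-- stated objective: simpler
-- what changed: Replaces the single mutating nested-loop pass with an elif dispatch over three state variables by flattening the draws once and computing each color's maximum independently with a filtered max (seeded with 0).
import Mathlib
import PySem

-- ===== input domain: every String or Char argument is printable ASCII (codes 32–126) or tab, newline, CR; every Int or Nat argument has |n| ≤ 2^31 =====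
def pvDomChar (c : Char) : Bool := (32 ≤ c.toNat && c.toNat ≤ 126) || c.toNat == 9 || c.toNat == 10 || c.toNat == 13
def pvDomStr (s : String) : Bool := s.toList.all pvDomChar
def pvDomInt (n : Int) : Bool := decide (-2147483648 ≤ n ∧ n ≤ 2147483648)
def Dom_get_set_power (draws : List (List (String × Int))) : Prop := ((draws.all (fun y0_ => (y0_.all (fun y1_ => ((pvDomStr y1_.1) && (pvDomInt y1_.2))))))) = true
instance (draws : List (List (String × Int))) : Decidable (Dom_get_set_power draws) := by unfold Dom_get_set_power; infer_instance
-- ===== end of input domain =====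

-- B flattens the draws and computes the three per-color maxima independently instead of
-- mutating three accumulators in one nested elif pass; objective: simpler.

-- ===== PORT A =====
def pvStepA (s : Int × Int × Int) (balls : String × Int) : Int × Int × Int :=
  if balls.1 == "red" && decide (s.1 < balls.2) then (balls.2, s.2.1, s.2.2)
  else if balls.1 == "green" && decide (s.2.1 < balls.2) then (s.1, balls.2, s.2.2)
  else if balls.1 == "blue" && decide (s.2.2 < balls.2) then (s.1, s.2.1, balls.2)
  else s

def get_set_power (draws : List (List (String × Int))) : Int :=
  let s := draws.foldl (fun s draw => draw.foldl pvStepA s) ((0 : Int), (0 : Int), (0 : Int))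
  s.1 * s.2.1 * s.2.2

-- ===== PORT B =====
-- Python's max over the nonempty list [0] + cs, scanning left to right
def pvMax0 (cs : List Int) : Int := cs.foldl max 0

def get_set_power_alt (draws : List (List (String × Int))) : Int :=
  let flat := draws.flatMap (fun draw => draw)
  let red := pvMax0 (flat.filterMap (fun p => if p.1 == "red" then some p.2 else none))
  let green := pvMax0 (flat.filterMap (fun p => if p.1 == "green" then some p.2 else none))
  let blue := pvMax0 (flat.filterMap (fun p => if p.1 == "blue" then some p.2 else none))
  red * green * blue

-- ===== PRECONDITION & SPEC =====
def Spec_get_set_power (draws : List (List (String × Int))) (out : Int) : Prop := out = get_set_power_alt draws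
instance (draws : List (List (String × Int))) (out : Int) : Decidable (Spec_get_set_power draws out) := by unfold Spec_get_set_power; infer_instance

-- ===== CLAIM (what is proved, stated in full; the proofs are below) =====
def Claim_equal_get_set_power : Prop := ∀ (draws : List (List (String × Int))), Dom_get_set_power draws → Spec_get_set_power draws (get_set_power draws)

-- ===== LEMMAS AND PROOFS =====

theorem foldl_flatMap_id {α : Type} (f : (Int × Int × Int) → α → (Int × Int × Int))
    (draws : List (List α)) (s : Int × Int × Int) :
    (draws.flatMap (fun d => d)).foldl f s = draws.foldl (fun s d => d.foldl f s) s := by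
  induction draws generalizing s with
  | nil => rfl
  | cons d ds ih => rw [List.flatMap_cons, List.foldl_append, ih, List.foldl_cons]

theorem stepA_invariant (l : List (String × Int)) (r g b : Int) :
    l.foldl pvStepA (r, g, b) =
      ((l.filterMap (fun p => if p.1 == "red" then some p.2 else none)).foldl max r,
       (l.filterMap (fun p => if p.1 == "green" then some p.2 else none)).foldl max g,
       (l.filterMap (fun p => if p.1 == "blue" then some p.2 else none)).foldl max b) := by
  induction l generalizing r g b with
  | nil => rfl
  | cons p l ih =>
    obtain ⟨c, n⟩ := p
    by_cases hr : c = "red"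
    · subst hr
      simp only [List.foldl_cons, pvStepA, List.filterMap_cons]
      by_cases h : r < n <;> simp [h, ih, max_def] <;> congr 1 <;> omega
    · by_cases hg : c = "green"
      · subst hg
        simp only [List.foldl_cons, pvStepA, List.filterMap_cons]
        by_cases h : g < n <;> simp [h, ih, max_def] <;> congr 1 <;> omega
      · by_cases hb : c = "blue"
        · subst hb
          simp only [List.foldl_cons, pvStepA, List.filterMap_cons]
          by_cases h : b < n <;> simp [h, ih, max_def] <;> congr 1 <;> omega
        · simp only [List.foldl_cons, pvStepA, List.filterMap_cons]
          simp [hr, hg, hb, ih]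

-- ===== VERDICT (by name: the statement is the Claim_ definition above) =====
theorem get_set_power_spec : Claim_equal_get_set_power := by
  intro draws _
  unfold Spec_get_set_power get_set_power get_set_power_alt pvMax0
  rw [← foldl_flatMap_id, stepA_invariant]
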